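-- pv_equiv track=rewrite | github.com/monkeylyf/interviewjam | medium/leetcode_find_valid_matrix_given_row_and_column_sums.py | restoreMatrix
-- ===== SOURCE A (Python) =====
-- from typing import List
--
-- def restoreMatrix(rowSum: List[int], colSum: List[int]) -> List[List[int]]:
--     n = len(rowSum)
--     m = len(colSum)
--     matrix = [[0 for _ in range(m)] for _ in range(n)]
--     for i in range(n):
--         for j in range(m):
--             min_val = min(rowSum[i], colSum[j])
--             matrix[i][j] = min_val
--             rowSum[i] -= min_val
--             colSum[j] -= min_val
--
--     return matrix
-- ===== SOURCE B (Python) =====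
-- from typing import List
--
-- def restoreMatrix(rowSum: List[int], colSum: List[int]) -> List[List[int]]:
--     # Recursive L-shaped shell peeling instead of a flat scan over every cell:
--     # consume the first row across the columns, then the first column's remainder
--     # down the remaining rows, and recurse on the (n-1)x(m-1) submatrix with the
--     # leftover sums; the greedy fill's dependencies make this order-exchange exact.
--     # Unlike A, the input lists are not mutated; equivalence is about the return value.
--     def shell(rows, cols):
--         if not rows or not cols:
--             return [[0] * len(cols) for _ in rows]
--         r = rows[0]
--         top, rem_cols = [], []
--         for x in cols:
--             v = min(r, x)
--             top.append(v)
--             r -= v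
--             rem_cols.append(x - v)
--         c0 = rem_cols[0]
--         left, rem_rows = [], []
--         for y in rows[1:]:
--             v = min(y, c0)
--             left.append(v)
--             c0 -= v
--             rem_rows.append(y - v)
--         sub = shell(rem_rows, rem_cols[1:])
--         return [top] + [[lv] + srow for lv, srow in zip(left, sub)]
--
--     return shell(list(rowSum), list(colSum))
-- ===== Notes on version B (the rewrite author's own statement) =====
-- stated objective: alternative
-- what changed: Replaces A's flat row-major scan over every cell by a recursion that peels the matrix in L-shaped shells: consume the first row across the columns, then the first column's remainder down the remaining rows, and recurse on the smaller submatrix with the leftover sums; a dependency/order-exchange argument shows the greedy fill is identical. B does not mutate its arguments (A zeroes rowSum/colSum in place); the equivalence is about the return value.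
import Mathlib
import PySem

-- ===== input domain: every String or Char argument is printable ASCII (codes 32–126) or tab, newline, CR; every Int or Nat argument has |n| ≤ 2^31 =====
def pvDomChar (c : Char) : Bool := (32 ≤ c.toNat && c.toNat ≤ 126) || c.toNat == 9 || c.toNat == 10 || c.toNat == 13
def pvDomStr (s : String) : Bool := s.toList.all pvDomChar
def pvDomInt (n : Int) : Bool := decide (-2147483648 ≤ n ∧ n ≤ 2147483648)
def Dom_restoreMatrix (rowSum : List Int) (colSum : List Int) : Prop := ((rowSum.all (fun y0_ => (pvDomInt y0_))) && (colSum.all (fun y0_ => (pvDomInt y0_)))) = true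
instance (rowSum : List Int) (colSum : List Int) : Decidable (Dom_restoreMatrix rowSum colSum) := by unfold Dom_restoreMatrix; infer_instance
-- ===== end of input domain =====

-- B peels the matrix in L-shaped shells (first row, then first column, recurse on the
-- submatrix) instead of A's flat row-major scan. A mutates rowSum/colSum in place and B
-- does not, so the equivalence proved here is about the return value only.

-- ===== PORT A =====
-- A's inner loop over row i: threads the current (mutated) rowSum[i] value r and the current
-- (mutated) colSum list; returns the row of the matrix and the updated colSum list.
-- (A's zero-initialised matrix is immaterial: every cell is overwritten.)
def innerA (r : Int) (cols : List Int) : List Int × List Int :=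
  match cols with
  | [] => ([], [])
  | x :: cs =>
    let v := min r x
    let p := innerA (r - v) cs
    (v :: p.1, (x - v) :: p.2)

-- A's outer loop over rows, threading the mutated colSum list.
def restoreMatrix (rowSum : List Int) (colSum : List Int) : List (List Int) :=
  match rowSum with
  | [] => []
  | r :: rs =>
    let p := innerA r colSum
    p.1 :: restoreMatrix rs p.2

-- ===== PORT B =====
-- Source B's first inner loop: consume rows[0] across the columns, returning the top row's
-- cells and the leftover column sums.
def rowConsume (r : Int) (cols : List Int) : List Int × List Int :=
  match cols with
  | [] => ([], [])
  | x :: cs =>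
    let v := min r x
    let p := rowConsume (r - v) cs
    (v :: p.1, (x - v) :: p.2)

-- Source B's second inner loop: consume rem_cols[0] down the remaining rows, returning the
-- left column's cells and the leftover row sums.
def colConsume (c : Int) (rows : List Int) : List Int × List Int :=
  match rows with
  | [] => ([], [])
  | y :: ys =>
    let v := min y c
    let p := colConsume (c - v) ys
    (v :: p.1, (y - v) :: p.2)

theorem colConsume_snd_len (rows : List Int) : ∀ c : Int, (colConsume c rows).2.length = rows.length := by
  induction rows with
  | nil => intro c; simp [colConsume]
  | cons y ys ih => intro c; simp [colConsume, ih]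

-- Source B's recursive shell: base case returns the zero matrix [[0]*len(cols) for _ in rows];
-- otherwise peel the top row and left column and recurse on the submatrix.
def shellB (rows : List Int) (cols : List Int) : List (List Int) :=
  match rows, cols with
  | [], _ => []
  | rows, [] => rows.map (fun _ => [])
  | r :: rs, c :: cs =>
    let p := rowConsume r (c :: cs)
    let q := colConsume (p.2.headD 0) rs
    p.1 :: List.zipWith (fun lv srow => lv :: srow) q.1 (shellB q.2 p.2.tail)
termination_by rows.length
decreasing_by simp [colConsume_snd_len]

def restoreMatrix_alt (rowSum : List Int) (colSum : List Int) : List (List Int) :=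
  shellB rowSum colSum

-- ===== PRECONDITION & SPEC =====
def Spec_restoreMatrix (rowSum : List Int) (colSum : List Int) (out : List (List Int)) : Prop := out = restoreMatrix_alt rowSum colSum
instance (rowSum : List Int) (colSum : List Int) (out : List (List Int)) : Decidable (Spec_restoreMatrix rowSum colSum out) := by unfold Spec_restoreMatrix; infer_instance

-- ===== CLAIM (what is proved, stated in full; the proofs are below) =====
def Claim_equal_restoreMatrix : Prop := ∀ (rowSum : List Int) (colSum : List Int), Dom_restoreMatrix rowSum colSum → Spec_restoreMatrix rowSum colSum (restoreMatrix rowSum colSum)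

-- ===== LEMMAS AND PROOFS =====

theorem rowConsume_eq_innerA (cols : List Int) : ∀ r : Int, rowConsume r cols = innerA r cols := by
  induction cols with
  | nil => intro r; rfl
  | cons x cs ih => intro r; simp [rowConsume, innerA, ih]

-- Exchange lemma: A's row-major processing of rows rs against columns (c :: cs) equals
-- peeling the first column (consuming c down the rows) and processing the rest.
theorem exchange (rs : List Int) : ∀ (c : Int) (cs : List Int),
    restoreMatrix rs (c :: cs)
      = List.zipWith (fun lv srow => lv :: srow) (colConsume c rs).1
          (restoreMatrix (colConsume c rs).2 cs) := by
  induction rs with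
  | nil => intro c cs; simp [restoreMatrix, colConsume]
  | cons r rs ih =>
    intro c cs
    simp only [restoreMatrix, innerA, colConsume, List.zipWith]
    congr 1
    exact ih (c - min r c) (innerA (r - min r c) cs).2

theorem A_nil (rs : List Int) : restoreMatrix rs [] = rs.map (fun _ => []) := by
  induction rs with
  | nil => simp [restoreMatrix]
  | cons r rs ih => simp [restoreMatrix, innerA, ih]

-- Main induction, on the number of rows (the shell recursion's own measure).
theorem shell_eq : ∀ (N : Nat) (rows cols : List Int), rows.length ≤ N →
    shellB rows cols = restoreMatrix rows cols := by
  intro N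
  induction N with
  | zero =>
    intro rows cols h
    have : rows = [] := List.eq_nil_of_length_eq_zero (Nat.le_zero.mp h)
    subst this; simp [shellB, restoreMatrix]
  | succ N ih =>
    intro rows cols h
    match rows, cols with
    | [], _ => simp [shellB, restoreMatrix]
    | r :: rs, [] => simp [shellB, A_nil]
    | r :: rs, c :: cs =>
      rw [shellB]
      simp only [rowConsume_eq_innerA]
      have hlen : (colConsume ((innerA r (c :: cs)).2.headD 0) rs).2.length ≤ N := by
        rw [colConsume_snd_len]
        exact Nat.lt_succ_iff.mp (by simpa using h)
      rw [ih _ _ hlen]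
      show _ = restoreMatrix (r :: rs) (c :: cs)
      simp only [restoreMatrix, innerA]
      congr 1
      rw [exchange]
      rfl

-- ===== VERDICT (by name: the statement is the Claim_ definition above) =====
theorem restoreMatrix_spec : Claim_equal_restoreMatrix := by
  intro rowSum colSum _
  unfold Spec_restoreMatrix restoreMatrix_alt
  exact (shell_eq rowSum.length rowSum colSum (le_refl _)).symm
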